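-- pv_equiv track=rewrite | github.com/oiuqyy/YMOdatabase | AfterLoop.py | second_classify
-- ===== SOURCE A (Python) =====
-- def second_classify(save, blocknames):
--     locss = []
--     for blockname in blocknames:
--         locs = []
--         for i in range(len(save)):
--             for j in range(len(save[0])):
--                 item = save[i][j]
--                 if item == blockname:
--                     locs.append((i, j))
--         locss.append(locs)
--     return tuple(locss)
-- ===== SOURCE B (Python) =====
-- def second_classify(save, blocknames):
--     cols = len(save[0]) if save else 0
--     index = {}
--     for i, row in enumerate(save):
--         for j in range(cols):
--             index.setdefault(row[j], []).append((i, j))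
--     return tuple(index.get(name, []) for name in blocknames)
-- ===== Notes on version B (the rewrite author's own statement) =====
-- stated objective: faster
-- what changed: Replaces the per-name full-grid rescans with a single indexing pass that groups every cell position by its value in a dict, then answers each blockname by one lookup.
-- outside the precondition, e.g. on second_classify([['a', 'b'], ['c']], []): A returns (), B raises IndexError
import Mathlib
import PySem

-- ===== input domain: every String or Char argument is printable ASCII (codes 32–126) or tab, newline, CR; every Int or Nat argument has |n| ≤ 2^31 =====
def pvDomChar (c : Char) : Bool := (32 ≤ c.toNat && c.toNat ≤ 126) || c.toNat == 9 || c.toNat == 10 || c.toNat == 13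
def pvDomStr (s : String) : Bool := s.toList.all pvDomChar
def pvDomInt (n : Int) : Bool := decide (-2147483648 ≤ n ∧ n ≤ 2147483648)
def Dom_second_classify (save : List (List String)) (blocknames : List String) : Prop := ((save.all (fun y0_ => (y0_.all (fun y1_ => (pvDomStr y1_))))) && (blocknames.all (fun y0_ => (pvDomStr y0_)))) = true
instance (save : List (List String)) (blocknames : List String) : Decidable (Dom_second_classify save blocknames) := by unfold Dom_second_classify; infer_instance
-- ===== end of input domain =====

-- B replaces A's per-name full-grid rescans by one indexing pass over the grid (value → positions dict)
-- plus a lookup per blockname: faster when there are many blocknames.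

-- ===== PORT A =====
-- literal transliteration of A: for each blockname, scan all rows i and columns j (bounded by len(save[0]))
def second_classify (save : List (List String)) (blocknames : List String) : List (List (Int × Int)) :=
  blocknames.foldl (fun locss blockname =>
    locss ++ [(PySem.List.pyRange 0 (save.length : Int) 1).foldl (fun locs i =>
      (PySem.List.pyRange 0 (((save.headD []).length : Int)) 1).foldl (fun locs j =>
        let item := PySem.List.pyGetD (PySem.List.pyGetD save i []) j ""
        if item == blockname then locs ++ [(i, j)] else locs) locs) []]) []

-- ===== PORT B =====
-- literal transliteration of B: one pass building index : cell value → list of (i, j), then one lookup per name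
def second_classify_alt (save : List (List String)) (blocknames : List String) : List (List (Int × Int)) :=
  let cols : Int := if save.isEmpty then 0 else ((save.headD []).length : Int)
  let index : PySem.Dict String (List (Int × Int)) :=
    (PySem.List.enumerate save 0).foldl (fun d p =>
      (PySem.List.pyRange 0 cols 1).foldl (fun d j =>
        d.modify (PySem.List.pyGetD p.2 j "") [] (· ++ [(p.1, j)])) d) PySem.Dict.empty
  blocknames.map (fun name => index.getD name [])

-- ===== PRECONDITION & SPEC =====
-- Pre_ excludes exactly the grids with a row shorter than the first row, on which a Python raises
-- IndexError (A whenever blocknames is nonempty; B, which indexes unconditionally, even when blocknames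
-- is empty — the only excluded inputs on which A still returns, cited in claim.json).
def Pre_second_classify (save : List (List String)) (blocknames : List String) : Prop :=
  ∀ row ∈ save, (save.headD []).length ≤ row.length
instance (save : List (List String)) (blocknames : List String) : Decidable (Pre_second_classify save blocknames) := by unfold Pre_second_classify; infer_instance

def pvWitness_second_classify : List (List String) × List String :=
  ([["a", "b"], ["b", "a"]], ["a", "z"])

def Spec_second_classify (save : List (List String)) (blocknames : List String) (out : List (List (Int × Int))) : Prop := out = second_classify_alt save blocknames
instance (save : List (List String)) (blocknames : List String) (out : List (List (Int × Int))) : Decidable (Spec_second_classify save blocknames out) := by unfold Spec_second_classify; infer_instance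

-- ===== CLAIM (what is proved, stated in full; the proofs are below) =====
def Claim_equal_second_classify : Prop := ∀ (save : List (List String)) (blocknames : List String), Dom_second_classify save blocknames → Pre_second_classify save blocknames → Spec_second_classify save blocknames (second_classify save blocknames)

-- ===== LEMMAS AND PROOFS =====

-- the grid cells in row-major order as (value, position) events, both loops flattened
def pvEvents (save : List (List String)) : List (String × (Int × Int)) :=
  (PySem.List.pyRange 0 (save.length : Int) 1).flatMap (fun i =>
    (PySem.List.pyRange 0 (((save.headD []).length : Int)) 1).map (fun j =>
      (PySem.List.pyGetD (PySem.List.pyGetD save i []) j "", (i, j))))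

-- A's inner double loop for one name = the matching events' positions
theorem pvScanA_eq (save : List (List String)) (name : String) :
    (PySem.List.pyRange 0 (save.length : Int) 1).foldl (fun locs i =>
      (PySem.List.pyRange 0 (((save.headD []).length : Int)) 1).foldl (fun locs j =>
        let item := PySem.List.pyGetD (PySem.List.pyGetD save i []) j ""
        if item == name then locs ++ [(i, j)] else locs) locs) []
    = ((pvEvents save).filter (fun e => e.1 == name)).map (·.2) := by
  have h : ((pvEvents save).filter (fun e => e.1 == name)).map (·.2)
      = (pvEvents save).foldl (fun locs (e : String × (Int × Int)) =>
          if e.1 == name then locs ++ [e.2] else locs) [] := by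
    rw [PySem.List.foldl_append_if (fun e : String × (Int × Int) => e.1 == name) (·.2)
      (pvEvents save) []]
    simp
  rw [h]
  unfold pvEvents
  rw [List.foldl_flatMap]
  simp [List.foldl_map]

-- B's cols equals A's column bound on every input
theorem pvCols_eq (save : List (List String)) :
    (if save.isEmpty then (0 : Int) else ((save.headD []).length : Int))
    = ((save.headD []).length : Int) := by
  cases save <;> simp

-- B's index looked up at a name = the matching events' positions
theorem pvIndex_eq (save : List (List String)) (name : String) :
    ((PySem.List.enumerate save 0).foldl (fun d p =>
      (PySem.List.pyRange 0 (if save.isEmpty then (0 : Int) else ((save.headD []).length : Int)) 1).foldl (fun d j =>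
        d.modify (PySem.List.pyGetD p.2 j "") [] (· ++ [(p.1, j)])) d) PySem.Dict.empty).getD name []
    = ((pvEvents save).filter (fun e => e.1 == name)).map (·.2) := by
  rw [pvCols_eq, PySem.List.enumerate_eq_map_pyRange save [], List.foldl_map]
  have h := PySem.Dict.getD_foldl_modify_append (pvEvents save)
    (PySem.Dict.empty : PySem.Dict String (List (Int × Int))) name
  simp only [PySem.Dict.getD_empty, List.nil_append] at h
  rw [← h]
  congr 1
  unfold pvEvents
  rw [List.foldl_flatMap]
  simp [List.foldl_map]

-- ===== VERDICT (by name: the statement is the Claim_ definition above) =====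
theorem second_classify_spec : Claim_equal_second_classify := by
  intro save blocknames _ _
  unfold Spec_second_classify second_classify second_classify_alt
  rw [PySem.List.foldl_append_singleton_eq_map]
  simp only [List.nil_append]
  apply List.map_congr_left
  intro name _
  rw [pvScanA_eq, pvIndex_eq]
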